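-- pv_equiv track=rewrite | github.com/mahditaharb-maker/myfiles | python2/OracleExpanded Dyadic Prime Counts.py | find_monotonic_index
-- ===== SOURCE A (Python) =====
-- def find_monotonic_index(F):
--     """
--     Finds the smallest k0 such that F[k] >= F[k-1] for all k in [k0+1..].
--     Returns k0 if found, else None.
--     """
--     max_k = len(F) - 1
--     # Try every candidate k0 from 1..max_k
--     for k0 in range(1, max_k):
--         ok = True
--         for k in range(k0 + 1, max_k + 1):
--             if F[k] < F[k - 1]:
--                 ok = False
--                 break
--         if ok:
--             return k0
--     return None
-- ===== SOURCE B (Python) =====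
-- def find_monotonic_index(F):
--     """
--     Finds the smallest k0 such that F[k] >= F[k-1] for all k in [k0+1..].
--     Returns k0 if found, else None.
--     """
--     last = 0
--     for k in range(1, len(F)):
--         if F[k] < F[k - 1]:
--             last = k
--     k0 = last if last > 1 else 1
--     return k0 if k0 <= len(F) - 2 else None
-- ===== Notes on version B (the rewrite author's own statement) =====
-- stated objective: faster
-- what changed: Replaced the quadratic scan over every candidate start index (each re-checking the whole suffix) by a single forward pass that records the last descent position and clamps it to the valid candidate range [1, len(F)-2].
import Mathlib
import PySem

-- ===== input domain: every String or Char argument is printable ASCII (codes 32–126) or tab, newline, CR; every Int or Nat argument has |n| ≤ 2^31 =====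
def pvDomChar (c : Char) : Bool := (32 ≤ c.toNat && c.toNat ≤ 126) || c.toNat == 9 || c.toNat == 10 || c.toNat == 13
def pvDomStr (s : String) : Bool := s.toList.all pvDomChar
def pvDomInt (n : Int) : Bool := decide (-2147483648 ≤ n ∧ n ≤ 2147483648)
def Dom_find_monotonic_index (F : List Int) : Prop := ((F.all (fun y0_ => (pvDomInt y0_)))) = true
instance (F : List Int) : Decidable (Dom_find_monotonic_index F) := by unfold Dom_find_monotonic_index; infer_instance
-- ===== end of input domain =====

-- B replaces A's quadratic scan over all candidate start indices by a single O(n) pass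
-- recording the last descent position, clamped to the valid candidate range.

-- ===== PORT A =====
-- literal port: outer loop over k0 in range(1, max_k) with early return (Option accumulator),
-- inner loop over k in range(k0+1, max_k+1) checking F[k] < F[k-1] (break ≡ .all, same value)
def find_monotonic_index (F : List Int) : Option Int :=
  let maxK : Int := (F.length : Int) - 1
  (PySem.List.pyRange 1 maxK 1).foldl
    (fun acc k0 =>
      match acc with
      | some r => some r
      | none =>
        let ok := (PySem.List.pyRange (k0 + 1) (maxK + 1) 1).all
          (fun k => !(decide (PySem.List.pyGetD F k 0 < PySem.List.pyGetD F (k - 1) 0)))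
        if ok then some k0 else none)
    none

-- ===== PORT B =====
-- single pass: `last` = last index k with F[k] < F[k-1] (0 if none), then clamp
def find_monotonic_index_alt (F : List Int) : Option Int :=
  let last := (PySem.List.pyRange 1 (F.length : Int) 1).foldl
    (fun a k => if PySem.List.pyGetD F k 0 < PySem.List.pyGetD F (k - 1) 0 then k else a) 0
  let k0 := if last > 1 then last else 1
  if k0 ≤ (F.length : Int) - 2 then some k0 else none

-- ===== PRECONDITION & SPEC =====
def Spec_find_monotonic_index (F : List Int) (out : Option Int) : Prop := out = find_monotonic_index_alt F
instance (F : List Int) (out : Option Int) : Decidable (Spec_find_monotonic_index F out) := by unfold Spec_find_monotonic_index; infer_instance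

-- ===== CLAIM (what is proved, stated in full; the proofs are below) =====
def Claim_equal_find_monotonic_index : Prop := ∀ (F : List Int), Dom_find_monotonic_index F → Spec_find_monotonic_index F (find_monotonic_index F)

-- ===== LEMMAS AND PROOFS =====

-- A's outer loop (Option accumulator, early return) is find? over the candidate range
theorem pv_foldl_first_hit (p : Int → Bool) :
    ∀ (l : List Int) (acc : Option Int),
      l.foldl (fun acc k => match acc with
        | some r => some r
        | none => if p k then some k else none) acc
      = (match acc with | some r => some r | none => l.find? p) := by
  intro l
  induction l with
  | nil => intro acc; cases acc <;> rfl
  | cons x xs ih =>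
    intro acc
    cases acc with
    | some r => simpa using ih (some r)
    | none =>
      by_cases hx : p x = true
      · simp [List.foldl_cons, hx, ih (some x)]
      · simp only [Bool.not_eq_true] at hx
        simp [List.foldl_cons, hx, ih none]

-- B's fold keeps the LAST element of l satisfying q (0 if none), for a strictly increasing l
theorem pv_foldl_last_spec (q : Int → Bool) (l : List Int) (hl : l.Pairwise (· < ·)) :
    (l.foldl (fun a k => if q k then k else a) 0 = 0 ∧ ∀ k ∈ l, q k = false)
    ∨ ((l.foldl (fun a k => if q k then k else a) 0) ∈ l
        ∧ q (l.foldl (fun a k => if q k then k else a) 0) = true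
        ∧ ∀ k ∈ l, (l.foldl (fun a k => if q k then k else a) 0) < k → q k = false) := by
  induction l using List.reverseRecOn with
  | nil => left; simp
  | append_singleton l x ih =>
    have hl' : l.Pairwise (· < ·) := (List.pairwise_append.mp hl).1
    have hlt : ∀ k ∈ l, k < x := by
      intro k hk
      exact (List.pairwise_append.mp hl).2.2 k hk x (by simp)
    have hfold : (l ++ [x]).foldl (fun a k => if q k then k else a) 0
        = if q x then x else l.foldl (fun a k => if q k then k else a) 0 := by
      simp [List.foldl_append]
    by_cases hx : q x = true
    · right
      rw [hfold, if_pos hx]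
      refine ⟨by simp, hx, ?_⟩
      intro k hk hxk
      rcases List.mem_append.mp hk with hk | hk
      · exact absurd (hlt k hk) (by omega)
      · simp at hk; omega
    · simp only [Bool.not_eq_true] at hx
      rw [hfold, if_neg (by simp [hx])]
      rcases ih hl' with ⟨h0, hall⟩ | ⟨hmem, hq, hafter⟩
      · left
        refine ⟨h0, ?_⟩
        intro k hk
        rcases List.mem_append.mp hk with hk | hk
        · exact hall k hk
        · simp at hk; simpa [hk] using hx
      · right
        refine ⟨List.mem_append.mpr (Or.inl hmem), hq, ?_⟩
        intro k hk hdk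
        rcases List.mem_append.mp hk with hk | hk
        · exact hafter k hk hdk
        · simp at hk; simpa [hk] using hx

-- find? of a threshold predicate (p x ↔ t ≤ x on the range) over range(a, b)
theorem pv_find?_pyRange_ge (a b t : Int) (p : Int → Bool)
    (hp : ∀ x, a ≤ x → x < b → p x = decide (t ≤ x)) :
    (PySem.List.pyRange a b 1).find? p
      = if max t a < b then some (max t a) else none := by
  set m := max t a with hm
  by_cases hmb : m < b
  · rw [if_pos hmb]
    have hsplit := PySem.List.pyRange_one_append a m b (by omega) (by omega)
    rw [hsplit, List.find?_append]
    have hleft : (PySem.List.pyRange a m 1).find? p = none := by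
      rw [List.find?_eq_none]
      intro x hx
      have hx' := (PySem.List.mem_pyRange_one).mp hx
      rw [hp x hx'.1 (by omega)]
      simp; omega
    rw [hleft]
    rw [PySem.List.pyRange_one_cons hmb, List.find?_cons]
    have : p m = true := by rw [hp m (by omega) hmb]; simp; omega
    simp [this]
  · rw [if_neg hmb]
    rw [List.find?_eq_none]
    intro x hx
    have hx' := (PySem.List.mem_pyRange_one).mp hx
    rw [hp x hx'.1 hx'.2]
    simp; omega

-- ===== VERDICT (by name: the statement is the Claim_ definition above) =====
theorem find_monotonic_index_spec : Claim_equal_find_monotonic_index := by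
  intro F _
  unfold Spec_find_monotonic_index
  set n : Int := (F.length : Int) with hn
  set q : Int → Bool := fun k => decide (PySem.List.pyGetD F k 0 < PySem.List.pyGetD F (k - 1) 0) with hq
  set d : Int := (PySem.List.pyRange 1 n 1).foldl (fun a k => if q k then k else a) 0 with hd
  -- facts about d (the last descent, 0 if none)
  have hspec := pv_foldl_last_spec q (PySem.List.pyRange 1 n 1) (PySem.List.pairwise_lt_pyRange_one 1 n)
  rw [← hd] at hspec
  have hafter : ∀ k, 1 ≤ k → k < n → d < k → q k = false := by
    intro k h1 h2 h3
    rcases hspec with ⟨_, hall⟩ | ⟨_, _, haft⟩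
    · exact hall k (PySem.List.mem_pyRange_one.mpr ⟨h1, h2⟩)
    · exact haft k (PySem.List.mem_pyRange_one.mpr ⟨h1, h2⟩) h3
  have hdcases : d = 0 ∨ (1 ≤ d ∧ d < n ∧ q d = true) := by
    rcases hspec with ⟨h0, _⟩ | ⟨hmem, hqd, _⟩
    · exact Or.inl h0
    · have := PySem.List.mem_pyRange_one.mp hmem
      exact Or.inr ⟨this.1, this.2, hqd⟩
  -- A's inner check equals the threshold test d ≤ k0 on the candidate range
  have hp : ∀ k0, 1 ≤ k0 → k0 < n - 1 →
      ((PySem.List.pyRange (k0 + 1) (n - 1 + 1) 1).all (fun k => !q k)) = decide (d ≤ k0) := by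
    intro k0 h1 h2
    by_cases hdk : d ≤ k0
    · have : ∀ k ∈ PySem.List.pyRange (k0 + 1) (n - 1 + 1) 1, (!q k) = true := by
        intro k hk
        have hk' := PySem.List.mem_pyRange_one.mp hk
        have := hafter k (by omega) (by omega) (by omega)
        simp [this]
      rw [List.all_eq_true.mpr this]
      simp [hdk]
    · rcases hdcases with h0 | ⟨hd1, hdn, hqd⟩
      · omega
      · have hmem : d ∈ PySem.List.pyRange (k0 + 1) (n - 1 + 1) 1 :=
          PySem.List.mem_pyRange_one.mpr ⟨by omega, by omega⟩
        rw [List.all_eq_false.mpr ⟨d, hmem, by simp [hqd]⟩]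
        simp [hdk]
  -- evaluate A
  have hA : find_monotonic_index F
      = (if max d 1 < n - 1 then some (max d 1) else none) := by
    simp only [find_monotonic_index, ← hn]
    rw [pv_foldl_first_hit]
    exact pv_find?_pyRange_ge 1 (n - 1) d _ (fun x hx1 hx2 => hp x hx1 hx2)
  -- evaluate B
  have hB : find_monotonic_index_alt F
      = (if max d 1 ≤ n - 2 then some (max d 1) else none) := by
    simp only [find_monotonic_index_alt, ← hn]
    have hfun : (fun (a k : Int) => if PySem.List.pyGetD F k 0 < PySem.List.pyGetD F (k - 1) 0 then k else a)
        = (fun a k => if q k = true then k else a) := by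
      funext a k; simp [hq]
    rw [hfun, ← hd]
    have hmax : (if d > 1 then d else 1) = max d 1 := by omega
    rw [hmax]
  rw [hA, hB]
  by_cases h : max d 1 < n - 1
  · rw [if_pos h, if_pos (by omega)]
  · rw [if_neg h, if_neg (by omega)]
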